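-- pv_equiv track=rewrite | github.com/Zamyk/ApprovalVoting | tmp.py | get_resolute_winner
-- ===== SOURCE A (Python) =====
-- def hamming_distance(c1, c2):
--     return bin(c1 ^ c2).count('1')
--
-- def get_score(votes, committee, weights):
--     distances = sorted([hamming_distance(vote, committee) for vote in votes], reverse=True)
--     ans = 0
--     for i in range(len(distances)):
--         ans += weights[i] * distances[i]
--     return ans
--
-- def get_resolute_winner(votes, m, weights):
--     best_score = float('inf')
--     winner = -1
--
--     for committee in range((1 << m) - 1, -1, -1):
--         score = get_score(votes, committee, weights)
--         if score < best_score: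
--             best_score = score
--             winner = committee
--     return winner
-- ===== SOURCE B (Python) =====
-- # B: counting-bucket score (no comparison sort) + ascending scan with <= (keeps the
-- # largest committee among those of minimal score, as A's descending strict scan does).
-- def _score(votes, committee, weights):
--     ds = [bin(v ^ committee).count('1') for v in votes]
--     cnt = [0] * (max(ds) + 1) if ds else []
--     for d in ds:
--         cnt[d] += 1
--     ans = 0
--     i = 0
--     for d in range(len(cnt) - 1, -1, -1):
--         for _ in range(cnt[d]):
--             ans += weights[i] * d
--             i += 1
--     return ans
--
-- def get_resolute_winner(votes, m, weights):
--     best = None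
--     winner = -1
--     for committee in range(1 << m):
--         s = _score(votes, committee, weights)
--         if best is None or s <= best:
--             best = s
--             winner = committee
--     return winner
-- ===== Notes on version B (the rewrite author's own statement) =====
-- stated objective: alternative
-- what changed: get_score's comparison sort of the distance list is replaced by a counting-bucket table consumed in descending distance order, and the outer committee scan runs ascending keeping ties (<=) instead of descending with strict <, which selects the same (largest) minimal-score committee.
import Mathlib
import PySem

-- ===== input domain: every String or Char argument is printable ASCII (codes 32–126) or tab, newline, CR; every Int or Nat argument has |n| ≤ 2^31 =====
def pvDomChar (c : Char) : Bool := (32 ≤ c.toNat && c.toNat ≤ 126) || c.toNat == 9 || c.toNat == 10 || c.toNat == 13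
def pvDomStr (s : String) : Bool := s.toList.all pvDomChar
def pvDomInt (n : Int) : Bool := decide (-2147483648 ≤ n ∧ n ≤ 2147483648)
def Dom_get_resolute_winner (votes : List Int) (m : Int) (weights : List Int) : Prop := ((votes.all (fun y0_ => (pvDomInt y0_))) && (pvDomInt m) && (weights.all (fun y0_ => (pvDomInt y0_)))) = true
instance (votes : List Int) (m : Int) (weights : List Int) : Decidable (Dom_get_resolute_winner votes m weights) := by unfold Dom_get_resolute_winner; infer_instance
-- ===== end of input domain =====

-- B replaces get_score's comparison sort by a counting-bucket table consumed in descending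
-- distance order, and scans committees ascending keeping ties (<=) instead of descending
-- with strict < ; same winner, different decomposition (objective: alternative).


-- ===== PORT A =====
-- hamming_distance(c1, c2) = bin(c1 ^ c2).count('1')  (popcount of |c1 ^ c2|)
def pvHamming (c1 c2 : Int) : Int := (PySem.Int.bitCount (PySem.Int.bxor c1 c2) : Int)

-- get_score: sort the distances descending, then ans += weights[i] * distances[i]
def pvGetScore (votes : List Int) (committee : Int) (weights : List Int) : Int :=
  let distances := PySem.List.sorted (votes.map (fun vote => pvHamming vote committee)) (fun x => x) true
  (PySem.List.pyRange 0 (PySem.List.len distances) 1).foldl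
    (fun ans i => ans + PySem.List.pyGetD weights i 0 * PySem.List.pyGetD distances i 0) 0

-- best_score = float('inf') is the `none` state; under Pre_ m ≥ 0, so 1 << m is 1 <<< m.toNat
def get_resolute_winner (votes : List Int) (m : Int) (weights : List Int) : Int :=
  ((PySem.List.pyRange ((1 <<< m.toNat) - 1) (-1) (-1)).foldl
    (fun (st : Option Int × Int) committee =>
      let score := pvGetScore votes committee weights
      match st.1 with
      | none => (some score, committee)
      | some best => if score < best then (some score, committee) else st)
    (none, -1)).2

-- ===== PORT B =====
-- counting-bucket score: cnt[d] = #votes at distance d; weights consumed in descending d order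
def pvScoreAlt (votes : List Int) (committee : Int) (weights : List Int) : Int :=
  let ds := votes.map (fun v => (PySem.Int.bitCount (PySem.Int.bxor v committee) : Int))
  -- cnt = [0] * (max(ds) + 1) if ds else []   (max? ds = none exactly when ds = [])
  let cnt0 : List Int :=
    match PySem.List.max? ds (fun x => x) with
    | some mx => PySem.List.pyRepeat [0] (mx + 1)
    | none => []
  let cnt := ds.foldl (fun c d => PySem.List.pySetD c d (PySem.List.pyGetD c d 0 + 1)) cnt0
  ((PySem.List.pyRange (PySem.List.len cnt - 1) (-1) (-1)).foldl
    (fun (st : Int × Int) d =>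
      (PySem.List.pyRange 0 (PySem.List.pyGetD cnt d 0) 1).foldl
        (fun (st : Int × Int) _ => (st.1 + PySem.List.pyGetD weights st.2 0 * d, st.2 + 1)) st)
    (0, 0)).1

-- ascending scan, ties kept (s <= best), so the largest committee of minimal score wins
def get_resolute_winner_alt (votes : List Int) (m : Int) (weights : List Int) : Int :=
  ((PySem.List.pyRange 0 (1 <<< m.toNat) 1).foldl
    (fun (st : Option Int × Int) committee =>
      let s := pvScoreAlt votes committee weights
      match st.1 with
      | none => (some s, committee)
      | some best => if s ≤ best then (some s, committee) else st)
    (none, -1)).2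

-- ===== PRECONDITION & SPEC =====
-- Pre_ excludes exactly the inputs where Python A raises: m < 0 (ValueError from 1 << m)
-- and len(weights) < len(votes) (IndexError from weights[i]).
def Pre_get_resolute_winner (votes : List Int) (m : Int) (weights : List Int) : Prop :=
  0 ≤ m ∧ votes.length ≤ weights.length
instance (votes : List Int) (m : Int) (weights : List Int) : Decidable (Pre_get_resolute_winner votes m weights) := by unfold Pre_get_resolute_winner; infer_instance

def pvWitness_get_resolute_winner : List Int × Int × List Int := ([1, 2], 2, [3, 1])

def Spec_get_resolute_winner (votes : List Int) (m : Int) (weights : List Int) (out : Int) : Prop := out = get_resolute_winner_alt votes m weights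
instance (votes : List Int) (m : Int) (weights : List Int) (out : Int) : Decidable (Spec_get_resolute_winner votes m weights out) := by unfold Spec_get_resolute_winner; infer_instance

-- ===== CLAIM (what is proved, stated in full; the proofs are below) =====
def Claim_equal_get_resolute_winner : Prop := ∀ (votes : List Int) (m : Int) (weights : List Int), Dom_get_resolute_winner votes m weights → Pre_get_resolute_winner votes m weights → Spec_get_resolute_winner votes m weights (get_resolute_winner votes m weights)

-- ===== LEMMAS AND PROOFS =====

-- the two fold step functions of the outer loops, abstracted over the score g
def pvStepA (g : Int → Int) (st : Option Int × Int) (c : Int) : Option Int × Int :=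
  match st.1 with
  | none => (some (g c), c)
  | some b => if g c < b then (some (g c), c) else st

def pvStepB (g : Int → Int) (st : Option Int × Int) (c : Int) : Option Int × Int :=
  match st.1 with
  | none => (some (g c), c)
  | some b => if g c ≤ b then (some (g c), c) else st

-- running minimum of g over l, seeded with b
def pvMinf (g : Int → Int) (b : Int) (l : List Int) : Int :=
  l.foldl (fun a c => min a (g c)) b

-- minimum of g over a nonempty list (0 on [])
def pvM (g : Int → Int) (l : List Int) : Int :=
  match l with
  | [] => 0
  | c :: t => pvMinf g (g c) t

lemma pvMinf_le (g : Int → Int) (l : List Int) : ∀ b : Int, pvMinf g b l ≤ b := by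
  induction l with
  | nil => intro b; simp [pvMinf]
  | cons c t ih =>
      intro b
      have := ih (min b (g c))
      simp only [pvMinf, List.foldl_cons] at *
      omega

lemma pvMinf_mem_le (g : Int → Int) (l : List Int) :
    ∀ b : Int, ∀ x ∈ l, pvMinf g b l ≤ g x := by
  induction l with
  | nil => intro b x hx; simp at hx
  | cons c t ih =>
      intro b x hx
      rcases List.mem_cons.mp hx with h | h
      · subst h
        have := pvMinf_le g t (min b (g x))
        simp only [pvMinf, List.foldl_cons] at *
        omega
      · have := ih (min b (g c)) x h
        simpa [pvMinf] using this

lemma pvMinf_attained (g : Int → Int) (l : List Int) :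
    ∀ b : Int, pvMinf g b l = b ∨ ∃ x ∈ l, g x = pvMinf g b l := by
  induction l with
  | nil => intro b; left; simp [pvMinf]
  | cons c t ih =>
      intro b
      have hstep : pvMinf g b (c :: t) = pvMinf g (min b (g c)) t := rfl
      rcases ih (min b (g c)) with h | ⟨x, hx, hgx⟩
      · by_cases hc : g c < b
        · right
          refine ⟨c, List.mem_cons_self, ?_⟩
          rw [hstep, h]; omega
        · left; rw [hstep, h]; omega
      · right; exact ⟨x, List.mem_cons_of_mem _ hx, by rw [hstep, ← hgx]⟩

lemma pvMinf_eq_of_all_gt (g : Int → Int) (l : List Int) :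
    ∀ b : Int, (∀ x ∈ l, ¬ g x ≤ b) → pvMinf g b l = b := by
  induction l with
  | nil => intro b _; simp [pvMinf]
  | cons c t ih =>
      intro b h
      have hc := h c List.mem_cons_self
      have hstep : pvMinf g b (c :: t) = pvMinf g (min b (g c)) t := rfl
      have hmin : min b (g c) = b := by omega
      rw [hstep, hmin]
      exact ih b (fun x hx => h x (List.mem_cons_of_mem _ hx))

lemma pvM_mem_le (g : Int → Int) (l : List Int) : ∀ x ∈ l, pvM g l ≤ g x := by
  cases l with
  | nil => intro x hx; simp at hx
  | cons c t =>
      intro x hx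
      rcases List.mem_cons.mp hx with h | h
      · subst h; exact le_trans (pvMinf_le g t (g x)) le_rfl
      · exact pvMinf_mem_le g t (g c) x h

lemma pvM_attained (g : Int → Int) (l : List Int) (h : l ≠ []) :
    ∃ x ∈ l, g x = pvM g l := by
  cases l with
  | nil => exact absurd rfl h
  | cons c t =>
      rcases pvMinf_attained g t (g c) with h1 | ⟨x, hx, hgx⟩
      · exact ⟨c, List.mem_cons_self, by simp [pvM, h1]⟩
      · exact ⟨x, List.mem_cons_of_mem _ hx, by simpa [pvM] using hgx⟩

lemma pvM_reverse (g : Int → Int) (l : List Int) : pvM g l.reverse = pvM g l := by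
  cases hl : l with
  | nil => simp
  | cons c t =>
      have hne : l ≠ [] := by simp [hl]
      have hner : l.reverse ≠ [] := by simp [hl]
      obtain ⟨x, hx, hgx⟩ := pvM_attained g l.reverse hner
      obtain ⟨y, hy, hgy⟩ := pvM_attained g l hne
      have h1 : pvM g l ≤ g x := pvM_mem_le g l x (List.mem_reverse.mp hx)
      have h2 : pvM g l.reverse ≤ g y := pvM_mem_le g l.reverse y (List.mem_reverse.mpr hy)
      rw [← hl]
      omega

-- there is an element of l attaining pvMinf as soon as some element is ≤ the seed
lemma pvAttained_of_exists_le (g : Int → Int) (l : List Int) (b : Int)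
    (h : ∃ x ∈ l, g x ≤ b) : ∃ x ∈ l, g x = pvMinf g b l := by
  rcases pvMinf_attained g l b with hE | hE
  · obtain ⟨x, hx, hgx⟩ := h
    have h1 : g x ≤ pvMinf g b l := by rw [hE]; exact hgx
    exact ⟨x, hx, le_antisymm h1 (pvMinf_mem_le g l b x hx)⟩
  · exact hE

lemma pvAttained_of_lt (g : Int → Int) (l : List Int) (b : Int)
    (h : pvMinf g b l < b) : ∃ x ∈ l, g x = pvMinf g b l := by
  rcases pvMinf_attained g l b with hE | hE
  · omega
  · exact hE

-- characterisation of A's strict-< fold from a `some` state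
lemma pvFoldA_some (g : Int → Int) (l : List Int) :
    ∀ b w : Int, l.foldl (pvStepA g) (some b, w) =
      (some (pvMinf g b l),
       if pvMinf g b l < b then (l.find? (fun c => g c == pvMinf g b l)).getD w else w) := by
  induction l with
  | nil => intro b w; simp [pvMinf]
  | cons c t ih =>
      intro b w
      have hstep : pvMinf g b (c :: t) = pvMinf g (min b (g c)) t := rfl
      have hle : pvMinf g (min b (g c)) t ≤ min b (g c) := pvMinf_le g t _
      by_cases hc : g c < b
      · have hmin : min b (g c) = g c := by omega
        rw [hmin] at hle
        have h1 : (c :: t).foldl (pvStepA g) (some b, w) = t.foldl (pvStepA g) (some (g c), c) := by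
          simp [pvStepA, hc]
        rw [h1, ih (g c) c, hstep, hmin]
        by_cases h2 : pvMinf g (g c) t < g c
        · have hb : pvMinf g (g c) t < b := by omega
          obtain ⟨x, hx, hgx⟩ := pvAttained_of_lt g t (g c) h2
          have hfind : (t.find? (fun z => g z == pvMinf g (g c) t)).isSome := by
            rw [List.find?_isSome]; exact ⟨x, hx, by simpa using hgx⟩
          obtain ⟨y, hy⟩ := Option.isSome_iff_exists.mp hfind
          rw [if_pos h2, if_pos hb, List.find?_cons_of_neg (by simp; omega), hy]
          simp
        · have hM : pvMinf g (g c) t = g c := by omega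
          have hb : pvMinf g (g c) t < b := by omega
          rw [if_neg h2, if_pos hb, List.find?_cons_of_pos (by simp [hM])]
          simp
      · have hmin : min b (g c) = b := by omega
        rw [hmin] at hle
        have h1 : (c :: t).foldl (pvStepA g) (some b, w) = t.foldl (pvStepA g) (some b, w) := by
          simp [pvStepA, hc]
        rw [h1, ih b w, hstep, hmin]
        by_cases h2 : pvMinf g b t < b
        · rw [if_pos h2, if_pos h2, List.find?_cons_of_neg (by simp; omega)]
        · rw [if_neg h2, if_neg h2]

-- characterisation of B's ≤ fold from a `some` state
lemma pvFoldB_some (g : Int → Int) (l : List Int) :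
    ∀ b w : Int, l.foldl (pvStepB g) (some b, w) =
      (some (pvMinf g b l),
       if l.any (fun c => g c ≤ b) then (l.reverse.find? (fun c => g c == pvMinf g b l)).getD w
       else w) := by
  induction l with
  | nil => intro b w; simp [pvMinf]
  | cons c t ih =>
      intro b w
      have hstep : pvMinf g b (c :: t) = pvMinf g (min b (g c)) t := rfl
      have hle : pvMinf g (min b (g c)) t ≤ min b (g c) := pvMinf_le g t _
      by_cases hc : g c ≤ b
      · have hmin : min b (g c) = g c := by omega
        rw [hmin] at hle
        have h1 : (c :: t).foldl (pvStepB g) (some b, w) = t.foldl (pvStepB g) (some (g c), c) := by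
          simp [pvStepB, hc]
        rw [h1, ih (g c) c, hstep, hmin]
        have hany : (c :: t).any (fun x => decide (g x ≤ b)) = true := by simp; left; exact hc
        rw [if_pos hany, List.reverse_cons, List.find?_append]
        by_cases h2 : t.any (fun x => decide (g x ≤ g c)) = true
        · obtain ⟨x, hx, hgx⟩ := pvAttained_of_exists_le g t (g c) (by simpa using h2)
          have hfind : (t.reverse.find? (fun z => g z == pvMinf g (g c) t)).isSome := by
            rw [List.find?_isSome]; exact ⟨x, List.mem_reverse.mpr hx, by simpa using hgx⟩
          obtain ⟨y, hy⟩ := Option.isSome_iff_exists.mp hfind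
          rw [if_pos h2, hy]
          simp
        · have hall : ∀ x ∈ t, ¬ g x ≤ g c := by
            intro x hx hle'
            exact h2 (List.any_eq_true.mpr ⟨x, hx, by simpa using hle'⟩)
          have hM : pvMinf g (g c) t = g c := pvMinf_eq_of_all_gt g t (g c) hall
          have hnone : t.reverse.find? (fun x => g x == pvMinf g (g c) t) = none := by
            rw [List.find?_eq_none]
            intro x hx
            have := hall x (List.mem_reverse.mp hx)
            simp; omega
          rw [if_neg h2, hnone, hM]
          simp
      · have hmin : min b (g c) = b := by omega
        rw [hmin] at hle
        have h1 : (c :: t).foldl (pvStepB g) (some b, w) = t.foldl (pvStepB g) (some b, w) := by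
          simp [pvStepB, hc]
        rw [h1, ih b w, hstep, hmin]
        have hany : (c :: t).any (fun x => decide (g x ≤ b)) = t.any (fun x => decide (g x ≤ b)) := by
          simp [hc]
        rw [hany, List.reverse_cons, List.find?_append]
        by_cases h2 : t.any (fun x => decide (g x ≤ b)) = true
        · obtain ⟨x, hx, hgx⟩ := pvAttained_of_exists_le g t b (by simpa using h2)
          have hfind : (t.reverse.find? (fun z => g z == pvMinf g b t)).isSome := by
            rw [List.find?_isSome]; exact ⟨x, List.mem_reverse.mpr hx, by simpa using hgx⟩
          obtain ⟨y, hy⟩ := Option.isSome_iff_exists.mp hfind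
          rw [if_pos h2, if_pos h2, hy]
          simp
        · rw [if_neg h2, if_neg h2]

lemma pvFoldA_none (g : Int → Int) (l : List Int) (w0 : Int) (h : l ≠ []) :
    l.foldl (pvStepA g) (none, w0) =
      (some (pvM g l), (l.find? (fun c => g c == pvM g l)).getD w0) := by
  cases l with
  | nil => exact absurd rfl h
  | cons c t =>
      have h1 : (c :: t).foldl (pvStepA g) (none, w0) = t.foldl (pvStepA g) (some (g c), c) := by
        simp [pvStepA]
      have hM : pvM g (c :: t) = pvMinf g (g c) t := rfl
      rw [h1, pvFoldA_some g t (g c) c, hM]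
      by_cases h2 : pvMinf g (g c) t < g c
      · obtain ⟨x, hx, hgx⟩ := pvAttained_of_lt g t (g c) h2
        have hfind : (t.find? (fun z => g z == pvMinf g (g c) t)).isSome := by
          rw [List.find?_isSome]; exact ⟨x, hx, by simpa using hgx⟩
        obtain ⟨y, hy⟩ := Option.isSome_iff_exists.mp hfind
        rw [if_pos h2, List.find?_cons_of_neg (by simp; omega), hy]
        simp
      · have hle := pvMinf_le g t (g c)
        have hMc : pvMinf g (g c) t = g c := by omega
        rw [if_neg h2, List.find?_cons_of_pos (by simp [hMc])]
        simp

lemma pvFoldB_none (g : Int → Int) (l : List Int) (w0 : Int) (h : l ≠ []) :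
    l.foldl (pvStepB g) (none, w0) =
      (some (pvM g l), (l.reverse.find? (fun c => g c == pvM g l)).getD w0) := by
  cases l with
  | nil => exact absurd rfl h
  | cons c t =>
      have h1 : (c :: t).foldl (pvStepB g) (none, w0) = t.foldl (pvStepB g) (some (g c), c) := by
        simp [pvStepB]
      have hM : pvM g (c :: t) = pvMinf g (g c) t := rfl
      rw [h1, pvFoldB_some g t (g c) c, hM, List.reverse_cons, List.find?_append]
      by_cases h2 : t.any (fun x => decide (g x ≤ g c)) = true
      · obtain ⟨x, hx, hgx⟩ := pvAttained_of_exists_le g t (g c) (by simpa using h2)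
        have hfind : (t.reverse.find? (fun z => g z == pvMinf g (g c) t)).isSome := by
          rw [List.find?_isSome]; exact ⟨x, List.mem_reverse.mpr hx, by simpa using hgx⟩
        obtain ⟨y, hy⟩ := Option.isSome_iff_exists.mp hfind
        rw [if_pos h2, hy]
        simp
      · have hall : ∀ x ∈ t, ¬ g x ≤ g c := by
          intro x hx hle'
          exact h2 (List.any_eq_true.mpr ⟨x, hx, by simpa using hle'⟩)
        have hMc : pvMinf g (g c) t = g c := pvMinf_eq_of_all_gt g t (g c) hall
        have hnone : t.reverse.find? (fun x => g x == pvMinf g (g c) t) = none := by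
          rw [List.find?_eq_none]
          intro x hx
          have := hall x (List.mem_reverse.mp hx)
          simp; omega
        rw [if_neg h2, hnone, hMc]
        simp

-- the descending strict-< scan and the ascending ≤ scan pick the same winner
lemma pvArgminRev (g : Int → Int) (l : List Int) :
    (l.reverse.foldl (pvStepA g) (none, -1)).2 = (l.foldl (pvStepB g) (none, -1)).2 := by
  by_cases hl : l = []
  · subst hl; rfl
  · have hr : l.reverse ≠ [] := by simpa using hl
    rw [pvFoldA_none g l.reverse (-1) hr, pvFoldB_none g l (-1) hl, pvM_reverse]

-- ===== score equality =====

-- the counting table: after the bump fold, entry k holds its old value plus count k ds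
lemma pvCnt_spec : ∀ (ds : List Int) (c : List Int),
    (∀ d ∈ ds, 0 ≤ d ∧ d < (c.length : Int)) → ∀ k : Int, 0 ≤ k →
    PySem.List.pyGetD
        (ds.foldl (fun c d => PySem.List.pySetD c d (PySem.List.pyGetD c d 0 + 1)) c) k 0
      = PySem.List.pyGetD c k 0 + (ds.count k : Int) := by
  intro ds
  induction ds with
  | nil => intro c h k hk; simp
  | cons d t ih =>
      intro c h k hk
      have h0 := (h d List.mem_cons_self).1
      have h1 := (h d List.mem_cons_self).2
      have hd : ((d.toNat : Nat) : Int) = d := Int.toNat_of_nonneg h0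
      have hk' : ((k.toNat : Nat) : Int) = k := Int.toNat_of_nonneg hk
      have hlen : (PySem.List.pySetD c d (PySem.List.pyGetD c d 0 + 1)).length = c.length :=
        PySem.List.length_pySetD c d _
      simp only [List.foldl_cons]
      rw [ih _ (fun x hx => by rw [hlen]; exact h x (List.mem_cons_of_mem _ hx)) k hk]
      have hget := PySem.List.pyGetD_pySetD_natCast c d.toNat k.toNat
        (PySem.List.pyGetD c (↑d.toNat) 0 + 1) 0 (by omega)
      rw [hd, hk'] at hget
      rw [hget, List.count_cons]
      by_cases hkd : k = d
      · rw [if_pos (by omega)]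
        simp [hkd]
        omega
      · rw [if_neg (by omega)]
        simp [Ne.symm hkd]

lemma pvLen_cnt : ∀ (ds : List Int) (c : List Int),
    (ds.foldl (fun c d => PySem.List.pySetD c d (PySem.List.pyGetD c d 0 + 1)) c).length
      = c.length := by
  intro ds
  induction ds with
  | nil => intro c; rfl
  | cons d t ih =>
      intro c
      simp only [List.foldl_cons]
      rw [ih, PySem.List.length_pySetD]

lemma pvGetD_replicate_zero (n : Nat) (k : Int) :
    PySem.List.pyGetD (List.replicate n (0 : Int)) k 0 = 0 := by
  by_cases h : PySem.Raise.InRange (List.replicate n (0 : Int)).length k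
  · have hm := PySem.List.pyGetD_mem (xs := List.replicate n (0 : Int)) (i := k) (d := 0) h
    exact List.eq_of_mem_replicate hm
  · exact PySem.List.pyGetD_of_none _ _ _ ((PySem.List.pyGet?_eq_none_iff _ _).mpr h)

-- a fold that ignores its list argument only iterates
lemma pvFoldl_const {σ : Type} (F : σ → σ) : ∀ {α : Type} (l : List α) (s : σ),
    l.foldl (fun s _ => F s) s = F^[l.length] s := by
  intro α l
  induction l with
  | nil => intro s; rfl
  | cons x t ih => intro s; simp only [List.foldl_cons, List.length_cons]; rw [ih, Function.iterate_succ_apply]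

lemma pvFoldl_replicate {σ : Type} (f : σ → Int → σ) (d : Int) : ∀ (n : Nat) (s : σ),
    (List.replicate n d).foldl f s = (fun s => f s d)^[n] s := by
  intro n
  induction n with
  | zero => intro s; rfl
  | succ k ih => intro s; rw [List.replicate_succ]; simp only [List.foldl_cons]; rw [ih, Function.iterate_succ_apply]

-- the inner  for _ in range(cnt[d])  loop is a fold over replicate
lemma pvInner {σ : Type} (k d : Int) (f : σ → Int → σ) (s : σ) :
    (PySem.List.pyRange 0 k 1).foldl (fun s _ => f s d) s
      = (List.replicate k.toNat d).foldl f s := by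
  rw [pvFoldl_const (fun s => f s d), pvFoldl_replicate]
  congr 1
  rw [PySem.List.length_pyRange_one]
  omega

lemma pvFoldl_flatMap {σ : Type} (block : Int → List Int) (f : σ → Int → σ) :
    ∀ (l : List Int) (s : σ),
    l.foldl (fun s d => (block d).foldl f s) s = (l.flatMap block).foldl f s := by
  intro l
  induction l with
  | nil => intro s; rfl
  | cons x t ih => intro s; simp only [List.foldl_cons, List.flatMap_cons, List.foldl_append]; rw [ih]

-- threading the weight index i through the fold is folding over enumerate
lemma pvCounter (ws : List Int) : ∀ (l : List Int) (a i : Int),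
    l.foldl (fun (st : Int × Int) d => (st.1 + PySem.List.pyGetD ws st.2 0 * d, st.2 + 1)) (a, i)
      = ((PySem.List.enumerate l i).foldl
           (fun acc p => acc + PySem.List.pyGetD ws p.1 0 * p.2) a,
         i + l.length) := by
  intro l
  induction l with
  | nil => intro a i; simp
  | cons d t ih =>
      intro a i
      rw [List.foldl_cons, PySem.List.enumerate_cons, List.foldl_cons, ih]
      simp only [Prod.mk.injEq]
      refine ⟨by simp, by simp; omega⟩

lemma pvCount_flat (n : Int → Nat) : ∀ (l : List Int), l.Nodup → ∀ a : Int,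
    (l.flatMap (fun d => List.replicate (n d) d)).count a = if a ∈ l then n a else 0 := by
  intro l
  induction l with
  | nil => intro _ a; simp
  | cons c t ih =>
      intro hnd a
      have hc : c ∉ t := (List.nodup_cons.mp hnd).1
      have ht : t.Nodup := (List.nodup_cons.mp hnd).2
      rw [List.flatMap_cons, List.count_append, List.count_replicate, ih ht a]
      by_cases ha : a = c
      · subst ha
        simp [hc]
      · simp [ha, Ne.symm ha, List.mem_cons]

lemma pvPairwise_replicate_ge (k : Nat) (c : Int) :
    (List.replicate k c).Pairwise (fun a b => b ≤ a) := by
  induction k with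
  | zero => simp
  | succ j ih =>
      rw [List.replicate_succ, List.pairwise_cons]
      exact ⟨fun y hy => le_of_eq (congrArg id (List.eq_of_mem_replicate hy)), ih⟩

lemma pvPairwise_flat (n : Int → Nat) : ∀ (l : List Int),
    l.Pairwise (fun a b => b < a) →
    (l.flatMap (fun d => List.replicate (n d) d)).Pairwise (fun a b => b ≤ a) := by
  intro l
  induction l with
  | nil => intro _; simp
  | cons c t ih =>
      intro hp
      have h1 := (List.pairwise_cons.mp hp).1
      have h2 := (List.pairwise_cons.mp hp).2
      rw [List.flatMap_cons]
      rw [List.pairwise_append]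
      refine ⟨pvPairwise_replicate_ge _ _, ih h2, ?_⟩
      intro x hx y hy
      have hxc : x = c := List.eq_of_mem_replicate hx
      obtain ⟨d, hd, hyd⟩ := List.mem_flatMap.mp hy
      have hyd' : y = d := List.eq_of_mem_replicate hyd
      rw [hxc, hyd']
      exact le_of_lt (h1 d hd)

-- the descending bucket range, as a list
lemma pvRangeDesc_pairwise (L : Int) :
    (PySem.List.pyRange (L - 1) (-1) (-1)).Pairwise (fun a b => b < a) := by
  rw [PySem.List.pyRange_neg_one_eq_reverse, List.pairwise_reverse]
  exact PySem.List.pairwise_lt_pyRange_one _ _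

lemma pvRangeDesc_nodup (L : Int) : (PySem.List.pyRange (L - 1) (-1) (-1)).Nodup := by
  exact (pvRangeDesc_pairwise L).imp (fun h => (ne_of_lt h).symm)

lemma pvRangeDesc_mem (L x : Int) :
    x ∈ PySem.List.pyRange (L - 1) (-1) (-1) ↔ 0 ≤ x ∧ x < L := by
  rw [PySem.List.mem_pyRange_neg_one]
  omega

-- A's indexed weights·distances loop is a fold over enumerate
lemma pvA_enum (S ws : List Int) :
    (PySem.List.pyRange 0 (PySem.List.len S) 1).foldl
        (fun ans i => ans + PySem.List.pyGetD ws i 0 * PySem.List.pyGetD S i 0) 0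
      = (PySem.List.enumerate S 0).foldl
          (fun acc p => acc + PySem.List.pyGetD ws p.1 0 * p.2) 0 := by
  rw [PySem.List.enumerate_eq_map_pyRange S (0 : Int), List.foldl_map]

lemma pvScore_eq (votes : List Int) (committee : Int) (weights : List Int) :
    pvGetScore votes committee weights = pvScoreAlt votes committee weights := by
  by_cases hv : votes = []
  · subst hv; rfl
  · obtain ⟨mx, hmx⟩ : ∃ mx, PySem.List.max?
        (votes.map (fun v => (PySem.Int.bitCount (PySem.Int.bxor v committee) : Int)))
        (fun x => x) = some mx := by
      cases hm : PySem.List.max?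
          (votes.map (fun v => (PySem.Int.bitCount (PySem.Int.bxor v committee) : Int)))
          (fun x => x) with
      | none =>
          have h0 := (PySem.List.max?_eq_none_iff _ _).mp hm
          simp only [List.map_eq_nil_iff] at h0
          exact absurd h0 hv
      | some mx => exact ⟨mx, rfl⟩
    set ds : List Int :=
      votes.map (fun v => (PySem.Int.bitCount (PySem.Int.bxor v committee) : Int)) with hds
    have hpos : ∀ d ∈ ds, 0 ≤ d := by
      intro d hd
      rw [hds] at hd
      obtain ⟨v, _, rfl⟩ := List.mem_map.mp hd
      exact Int.natCast_nonneg _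
    have hmaxd : ∀ d ∈ ds, d ≤ mx := fun d hd => PySem.List.max?_isMax hmx d hd
    have hmx0 : 0 ≤ mx := hpos mx (PySem.List.max?_mem hmx)
    set cnt0 : List Int := List.replicate (mx + 1).toNat (0 : Int) with hcnt0
    set cnt : List Int :=
      ds.foldl (fun c d => PySem.List.pySetD c d (PySem.List.pyGetD c d 0 + 1)) cnt0 with hcnt
    have hrange : ∀ d ∈ ds, 0 ≤ d ∧ d < (cnt0.length : Int) := by
      intro d hd
      refine ⟨hpos d hd, ?_⟩
      have := hmaxd d hd
      rw [hcnt0, List.length_replicate]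
      omega
    have hcv : ∀ k : Int, 0 ≤ k → PySem.List.pyGetD cnt k 0 = (ds.count k : Int) := by
      intro k hk
      rw [hcnt, pvCnt_spec ds cnt0 hrange k hk, hcnt0, pvGetD_replicate_zero]
      omega
    have hlenc : cnt.length = (mx + 1).toNat := by
      rw [hcnt, pvLen_cnt, hcnt0, List.length_replicate]
    have hlc : PySem.List.len cnt - 1 = (mx + 1) - 1 := by
      rw [PySem.List.len_eq, hlenc]
      omega
    set expand : List Int :=
      (PySem.List.pyRange ((mx + 1) - 1) (-1) (-1)).flatMap
        (fun d => List.replicate (PySem.List.pyGetD cnt d 0).toNat d) with hexp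
    have hperm : expand.Perm ds := by
      rw [List.perm_iff_count]
      intro a
      rw [hexp, pvCount_flat _ _ (pvRangeDesc_nodup (mx + 1)) a]
      by_cases ha : a ∈ PySem.List.pyRange ((mx + 1) - 1) (-1) (-1)
      · have h0a := (pvRangeDesc_mem (mx + 1) a).mp ha
        rw [if_pos ha, hcv a h0a.1]
        simp
      · rw [if_neg ha]
        symm
        rw [List.count_eq_zero]
        intro hads
        exact ha ((pvRangeDesc_mem (mx + 1) a).mpr
          ⟨hpos a hads, by have := hmaxd a hads; omega⟩)
    have hpw : expand.Pairwise (fun a b => b ≤ a) := by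
      rw [hexp]
      exact pvPairwise_flat _ _ (pvRangeDesc_pairwise (mx + 1))
    have hSpw : (PySem.List.sorted ds (fun x => x) true).Pairwise (fun a b => b ≤ a) := by
      simpa using PySem.List.sorted_pairwise_rev ds (fun x => x)
    have hSperm : (PySem.List.sorted ds (fun x => x) true).Perm ds :=
      PySem.List.sorted_perm ds _ true
    have hES : expand = PySem.List.sorted ds (fun x => x) true :=
      List.Perm.eq_of_pairwise (fun a b _ _ h1 h2 => le_antisymm h2 h1) hpw hSpw
        (hperm.trans hSperm.symm)
    have hfun : (fun (st : Int × Int) d =>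
          (PySem.List.pyRange 0 (PySem.List.pyGetD cnt d 0) 1).foldl
            (fun st _ => (st.1 + PySem.List.pyGetD weights st.2 0 * d, st.2 + 1)) st)
        = (fun (st : Int × Int) d =>
          (List.replicate (PySem.List.pyGetD cnt d 0).toNat d).foldl
            (fun st x => (st.1 + PySem.List.pyGetD weights st.2 0 * x, st.2 + 1)) st) := by
      funext st d
      exact pvInner (PySem.List.pyGetD cnt d 0) d
        (fun st x => (st.1 + PySem.List.pyGetD weights st.2 0 * x, st.2 + 1)) st
    simp only [pvGetScore, pvHamming, pvScoreAlt]
    rw [← hds]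
    simp only [hmx]
    rw [PySem.List.pyRepeat_singleton, ← hcnt0, ← hcnt,
        pvA_enum (PySem.List.sorted ds (fun x => x) true) weights,
        hlc, hfun,
        pvFoldl_flatMap (fun d => List.replicate (PySem.List.pyGetD cnt d 0).toNat d)
          (fun st x => (st.1 + PySem.List.pyGetD weights st.2 0 * x, st.2 + 1))
          (PySem.List.pyRange ((mx + 1) - 1) (-1) (-1)) ((0 : Int), (0 : Int)),
        ← hexp,
        pvCounter weights expand 0 0,
        hES]

-- ===== VERDICT (by name: the statement is the Claim_ definition above) =====
theorem get_resolute_winner_spec : Claim_equal_get_resolute_winner := by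
  intro votes m weights _hDom _hPre
  unfold Spec_get_resolute_winner
  have hr : PySem.List.pyRange ((1 <<< m.toNat) - 1) (-1) (-1)
      = (PySem.List.pyRange 0 (1 <<< m.toNat) 1).reverse := by
    rw [PySem.List.pyRange_neg_one_eq_reverse]
    norm_num
  have hg : (fun c => pvGetScore votes c weights) = fun c => pvScoreAlt votes c weights :=
    funext fun c => pvScore_eq votes c weights
  have hA : get_resolute_winner votes m weights
      = ((PySem.List.pyRange 0 (1 <<< m.toNat) 1).reverse.foldl
          (pvStepA (fun c => pvGetScore votes c weights)) (none, -1)).2 := by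
    unfold get_resolute_winner
    rw [hr]
    rfl
  have hB : get_resolute_winner_alt votes m weights
      = ((PySem.List.pyRange 0 (1 <<< m.toNat) 1).foldl
          (pvStepB (fun c => pvScoreAlt votes c weights)) (none, -1)).2 := rfl
  rw [hA, hg, hB]
  exact pvArgminRev _ _
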